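-- pv_equiv track=rewrite | github.com/eastonman/vibefetch | vibefetch/chart.py | _text_dimensions
-- ===== SOURCE A (Python) =====
-- from typing import Dict, Iterable, List, Optional, Tuple
--
-- _FONT_WIDTH = 3
--
-- _FONT_HEIGHT = 5
--
-- _FONT_SPACING = 1
--
-- _FONT_LINE_SPACING = 2
--
-- def _text_dimensions(text: str, scale: int) -> Tuple[int, int]:
--     if scale <= 0:
--         scale = 1
--     lines = text.splitlines() or [""]
--     char_w = _FONT_WIDTH * scale
--     char_h = _FONT_HEIGHT * scale
--     spacing = _FONT_SPACING * scale
--     line_spacing = _FONT_LINE_SPACING * scale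
--     width = 0
--     for line in lines:
--         if not line:
--             line_width = 0
--         else:
--             line_width = len(line) * char_w + max(0, len(line) - 1) * spacing
--         width = max(width, line_width)
--     height = len(lines) * char_h + max(0, len(lines) - 1) * line_spacing
--     return width, height
-- ===== SOURCE B (Python) =====
-- _FONT_WIDTH = 3
-- _FONT_HEIGHT = 5
-- _FONT_SPACING = 1
-- _FONT_LINE_SPACING = 2
--
-- def _text_dimensions(text: str, scale: int):
--     # Single character-level scan: track current line length, max line length,
--     # and line count directly, never materialising the list of lines.
--     if scale <= 0:
--         scale = 1
--     m = 0       # longest line seen so far (in characters)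
--     cur = 0     # length of the current line
--     n = 1       # number of lines
--     i = 0
--     L = len(text)
--     while i < L:
--         c = text[i]
--         if c == '\n' or c == '\r':
--             if cur > m:
--                 m = cur
--             cur = 0
--             if c == '\r' and i + 1 < L and text[i + 1] == '\n':
--                 i += 1      # '\r\n' is a single line break
--             if i + 1 < L:   # a break at the very end does not open a new line
--                 n += 1
--             i += 1
--         else:
--             cur += 1
--             i += 1
--     if cur > m:
--         m = cur
--     width = m * (_FONT_WIDTH * scale) + max(0, m - 1) * (_FONT_SPACING * scale)
--     height = n * (_FONT_HEIGHT * scale) + max(0, n - 1) * (_FONT_LINE_SPACING * scale)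
--     return width, height
-- ===== Notes on version B (the rewrite author's own statement) =====
-- stated objective: alternative
-- what changed: B never builds the list of lines: it streams over the characters once with an explicit index, handling '\n', '\r' and '\r\n' itself while maintaining current-line length, maximum line length and line count, then sizes once; A splits the text into a list of lines and runs a per-line width/running-max loop.
import Mathlib
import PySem

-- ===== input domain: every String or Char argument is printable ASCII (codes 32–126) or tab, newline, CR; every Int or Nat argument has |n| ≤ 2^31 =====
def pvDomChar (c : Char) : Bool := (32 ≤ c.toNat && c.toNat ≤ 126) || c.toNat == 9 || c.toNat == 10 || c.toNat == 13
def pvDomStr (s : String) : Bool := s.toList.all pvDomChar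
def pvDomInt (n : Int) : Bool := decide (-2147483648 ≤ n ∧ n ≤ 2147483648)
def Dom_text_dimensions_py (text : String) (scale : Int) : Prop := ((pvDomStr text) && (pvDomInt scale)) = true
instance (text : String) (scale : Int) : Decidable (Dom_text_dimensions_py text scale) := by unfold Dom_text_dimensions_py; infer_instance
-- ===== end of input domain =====

-- B streams over the characters once (explicit index, handling '\n'/'\r'/'\r\n' itself,
-- tracking current-line length, max length and line count) instead of splitting into a
-- list of lines and looping over it (objective: alternative decomposition, same cost).


-- ===== PORT A =====
def text_dimensions_py (text : String) (scale : Int) : Int × Int :=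
  let scale := if scale ≤ 0 then 1 else scale
  let lines := (fun ls => if ls = [] then [""] else ls) (PySem.Str.splitlines text)
  let char_w : Int := 3 * scale
  let char_h : Int := 5 * scale
  let spacing : Int := 1 * scale
  let line_spacing : Int := 2 * scale
  let width := lines.foldl (fun w line =>
    let lw : Int :=
      if PySem.Str.len line = 0 then 0
      else PySem.Str.len line * char_w + max 0 (PySem.Str.len line - 1) * spacing
    max w lw) 0
  let height : Int := PySem.List.len lines * char_h + max 0 (PySem.List.len lines - 1) * line_spacing
  (width, height)

-- ===== PORT B =====
-- Source B's while loop over the index i, as the obvious structural recursion over the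
-- remaining characters with the same state (cur, m, n); text[i+1] lookahead = rest.head?.
def tdScan : List Char → Int → Int → Int → Int × Int
  | [], cur, m, n => (max m cur, n)
  | c :: rest, cur, m, n =>
    if c = '\n' ∨ c = '\r' then
      let rest' := if c = '\r' ∧ rest.head? = some '\n' then rest.tail else rest
      tdScan rest' 0 (max m cur) (if rest' = [] then n else n + 1)
    else
      tdScan rest (cur + 1) m n
termination_by s => s.length
decreasing_by
  · simp only [List.length_cons]
    split <;> simp [List.length_tail]
  · simp

def text_dimensions_py_alt (text : String) (scale : Int) : Int × Int :=
  let scale := if scale ≤ 0 then 1 else scale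
  let mn := tdScan text.toList 0 0 1
  let width : Int := mn.1 * (3 * scale) + max 0 (mn.1 - 1) * (1 * scale)
  let height : Int := mn.2 * (5 * scale) + max 0 (mn.2 - 1) * (2 * scale)
  (width, height)

-- ===== PRECONDITION & SPEC =====
def Spec_text_dimensions_py (text : String) (scale : Int) (out : Int × Int) : Prop := out = text_dimensions_py_alt text scale
instance (text : String) (scale : Int) (out : Int × Int) : Decidable (Spec_text_dimensions_py text scale out) := by unfold Spec_text_dimensions_py; infer_instance

-- ===== CLAIM (what is proved, stated in full; the proofs are below) =====
def Claim_equal_text_dimensions_py : Prop := ∀ (text : String) (scale : Int), Dom_text_dimensions_py text scale → Spec_text_dimensions_py text scale (text_dimensions_py text scale)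

-- ===== LEMMAS AND PROOFS =====

-- the break predicate PySem.Chars.splitlines passes to its worker, named
def pvIsB : Char → Bool := fun c =>
  have n := c.toNat
  decide (n = 10) || decide (n = 13) || decide (n = 11) || decide (n = 12) || decide (n = 28) ||
    decide (n = 29) || decide (n = 30) || decide (n = 133) || decide (n = 8232) || decide (n = 8233)

theorem pv_splitlines_eq (s : List Char) :
    PySem.Chars.splitlines s = PySem.Chars.splitlines.go pvIsB s [] [] := rfl

-- on the domain's characters, the only line breaks are '\n' and '\r'
theorem pv_isB_iff (c : Char) (h : pvDomChar c = true) :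
    pvIsB c = true ↔ (c = '\n' ∨ c = '\r') := by
  constructor
  · intro hb
    simp only [pvDomChar, Bool.or_eq_true, Bool.and_eq_true, decide_eq_true_eq, beq_iff_eq] at h
    simp only [pvIsB, Bool.or_eq_true, decide_eq_true_eq] at hb
    have h10 : c.toNat = 10 ∨ c.toNat = 13 := by omega
    have hc := Char.ofNat_toNat c
    rcases h10 with h10 | h10
    · left; rw [h10] at hc; rw [← hc]
    · right; rw [h10] at hc; rw [← hc]
  · rintro (rfl | rfl) <;> decide

-- the worker's accumulator is just prepended output
theorem pv_go_acc (isB : Char → Bool) :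
    ∀ (k : Nat) (s cur : List Char) (acc : List (List Char)), s.length ≤ k →
      PySem.Chars.splitlines.go isB s cur acc =
        acc.reverse ++ PySem.Chars.splitlines.go isB s cur [] := by
  intro k
  induction k with
  | zero =>
    intro s cur acc hk
    have : s = [] := by cases s <;> simp_all
    subst this
    rw [PySem.Chars.splitlines.go.eq_1, PySem.Chars.splitlines.go.eq_1]
    split <;> simp
  | succ k ih =>
    intro s cur acc hk
    match s with
    | [] =>
      rw [PySem.Chars.splitlines.go.eq_1, PySem.Chars.splitlines.go.eq_1]
      split <;> simp
    | c :: rest =>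
      by_cases hcr : c = '\r' ∧ ∃ r1, rest = '\n' :: r1
      · obtain ⟨rfl, r1, rfl⟩ := hcr
        rw [PySem.Chars.splitlines.go.eq_2, PySem.Chars.splitlines.go.eq_2,
          ih r1 [] (cur.reverse :: acc) (by simp only [List.length_cons] at hk; omega),
          ih r1 [] [cur.reverse] (by simp only [List.length_cons] at hk; omega)]
        simp
      · have hside : ∀ (rest_1 : List Char), c = '\r' → rest = '\n' :: rest_1 → False := by
          intro r1 h1 h2; exact hcr ⟨h1, r1, h2⟩
        rw [PySem.Chars.splitlines.go.eq_3 isB _ _ c rest hside,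
          PySem.Chars.splitlines.go.eq_3 isB _ _ c rest hside]
        split
        · rw [ih rest [] (cur.reverse :: acc) (by simp only [List.length_cons] at hk; omega),
            ih rest [] [cur.reverse] (by simp only [List.length_cons] at hk; omega)]
          simp
        · exact ih rest (c :: cur) acc (by simp only [List.length_cons] at hk; omega)

-- the worker never returns [] unless everything is empty
theorem pv_go_ne_nil (isB : Char → Bool) :
    ∀ (k : Nat) (s cur : List Char) (acc : List (List Char)), s.length ≤ k →
      (s ≠ [] ∨ cur ≠ [] ∨ acc ≠ []) → PySem.Chars.splitlines.go isB s cur acc ≠ [] := by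
  intro k
  induction k with
  | zero =>
    intro s cur acc hk hne
    have : s = [] := by cases s <;> simp_all
    subst this
    rw [PySem.Chars.splitlines.go.eq_1]
    split <;> simp_all [List.isEmpty_iff]
  | succ k ih =>
    intro s cur acc hk hne
    match s with
    | [] =>
      rw [PySem.Chars.splitlines.go.eq_1]
      split <;> simp_all [List.isEmpty_iff]
    | c :: rest =>
      by_cases hcr : c = '\r' ∧ ∃ r1, rest = '\n' :: r1
      · obtain ⟨rfl, r1, rfl⟩ := hcr
        rw [PySem.Chars.splitlines.go.eq_2]
        exact ih r1 [] (cur.reverse :: acc) (by simp only [List.length_cons] at hk; omega) (by simp)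
      · have hside : ∀ (rest_1 : List Char), c = '\r' → rest = '\n' :: rest_1 → False := by
          intro r1 h1 h2; exact hcr ⟨h1, r1, h2⟩
        rw [PySem.Chars.splitlines.go.eq_3 isB _ _ c rest hside]
        split
        · exact ih rest [] (cur.reverse :: acc) (by simp only [List.length_cons] at hk; omega) (by simp)
        · exact ih rest (c :: cur) acc (by simp only [List.length_cons] at hk; omega) (by simp)

-- core invariant: the scan computes max line length and line count of the worker's output
theorem pv_scan :
    ∀ (k : Nat) (s cur : List Char) (m n : Int), s.length ≤ k →
      s.all pvDomChar = true → 0 ≤ m →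
      tdScan s (cur.length : Int) m n =
        (((PySem.Chars.splitlines.go pvIsB s cur []).map (fun l => (l.length : Int))).foldl max m,
         n + max 0 (((PySem.Chars.splitlines.go pvIsB s cur []).length : Int) - 1)) := by
  intro k
  induction k with
  | zero =>
    intro s cur m n hk hdom hm
    have : s = [] := by cases s <;> simp_all
    subst this
    rw [PySem.Chars.splitlines.go.eq_1, tdScan]
    by_cases hc : cur = []
    · subst hc; simp; omega
    · rw [if_neg (by simp [List.isEmpty_iff, hc])]
      simp
  | succ k ih =>
    intro s cur m n hk hdom hm
    match s with
    | [] =>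
      rw [PySem.Chars.splitlines.go.eq_1, tdScan]
      by_cases hc : cur = []
      · subst hc; simp; omega
      · rw [if_neg (by simp [List.isEmpty_iff, hc])]
        simp
    | c :: rest =>
      have hdc : pvDomChar c = true := by
        simp only [List.all_cons, Bool.and_eq_true] at hdom; exact hdom.1
      have hdr : rest.all pvDomChar = true := by
        simp only [List.all_cons, Bool.and_eq_true] at hdom; exact hdom.2
      by_cases hcr : c = '\r' ∧ ∃ r1, rest = '\n' :: r1
      · obtain ⟨rfl, r1, rfl⟩ := hcr
        have hdr1 : r1.all pvDomChar = true := by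
          simp only [List.all_cons, Bool.and_eq_true] at hdr; exact hdr.2
        rw [PySem.Chars.splitlines.go.eq_2,
          pv_go_acc pvIsB r1.length r1 [] [cur.reverse] le_rfl]
        rw [tdScan]
        rw [if_pos (by right; rfl)]
        have key := ih r1 [] (max m (cur.length : Int)) (if r1 = [] then n else n + 1)
          (by simp only [List.length_cons] at hk; omega) hdr1 (le_trans hm (le_max_left _ _))
        simp only [List.length_nil, Nat.cast_zero] at key
        refine key.trans ?_
        refine Prod.ext ?_ ?_
        · simp [List.foldl_cons]
        · simp only
          by_cases hr1 : r1 = []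
          · subst hr1
            rw [PySem.Chars.splitlines.go.eq_1]
            simp
          · have hne := pv_go_ne_nil pvIsB r1.length r1 [] [] le_rfl (by simp [hr1])
            have hpos : 1 ≤ ((PySem.Chars.splitlines.go pvIsB r1 [] []).length : Int) := by
              rcases List.exists_cons_of_ne_nil hne with ⟨a, t, hat⟩
              rw [hat]; simp
            rw [if_neg hr1]
            simp only [List.length_append, List.length_cons, List.length_nil, List.length_reverse]
            push_cast
            omega
      · have hside : ∀ (rest_1 : List Char), c = '\r' → rest = '\n' :: rest_1 → False := by
          intro r1 h1 h2; exact hcr ⟨h1, r1, h2⟩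
        rw [PySem.Chars.splitlines.go.eq_3 pvIsB _ _ c rest hside]
        by_cases hb : c = '\n' ∨ c = '\r'
        · rw [if_pos ((pv_isB_iff c hdc).2 hb)]
          rw [pv_go_acc pvIsB rest.length rest [] [cur.reverse] le_rfl]
          rw [tdScan, if_pos hb]
          have hrest' : ¬ (c = '\r' ∧ rest.head? = some '\n') := by
            rintro ⟨h1, h2⟩
            rcases rest with _ | ⟨r0, r1⟩
            · simp at h2
            · simp only [List.head?_cons, Option.some.injEq] at h2
              exact hcr ⟨h1, r1, by rw [h2]⟩
          have key := ih rest [] (max m (cur.length : Int)) (if rest = [] then n else n + 1)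
            (by simp only [List.length_cons] at hk; omega) hdr (le_trans hm (le_max_left _ _))
          simp only [List.length_nil, Nat.cast_zero] at key
          rw [if_neg hrest']
          refine key.trans ?_
          refine Prod.ext ?_ ?_
          · simp [List.foldl_cons]
          · simp only
            by_cases hr1 : rest = []
            · subst hr1
              rw [PySem.Chars.splitlines.go.eq_1]
              simp
            · have hne := pv_go_ne_nil pvIsB rest.length rest [] [] le_rfl (by simp [hr1])
              have hpos : 1 ≤ ((PySem.Chars.splitlines.go pvIsB rest [] []).length : Int) := by
                rcases List.exists_cons_of_ne_nil hne with ⟨a, t, hat⟩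
                rw [hat]; simp
              rw [if_neg hr1]
              simp only [List.length_append, List.length_cons, List.length_nil, List.length_reverse]
              push_cast
              omega
        · rw [if_neg (by intro hbt; exact hb ((pv_isB_iff c hdc).1 hbt))]
          rw [tdScan, if_neg hb]
          have hcast : ((cur.length : Int) + 1) = (((c :: cur).length : Nat) : Int) := by
            simp only [List.length_cons]; push_cast; ring
          rw [hcast]
          exact ih rest (c :: cur) m n (by simp only [List.length_cons] at hk; omega) hdr hm

-- the per-line width formula is monotone-compatible with max
theorem pv_f_max (cw sp a b : Int) (hcw : 0 ≤ cw) (hsp : 0 ≤ sp) (ha : 0 ≤ a) (hb : 0 ≤ b) :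
    max (a * cw + max 0 (a - 1) * sp) (b * cw + max 0 (b - 1) * sp)
      = max a b * cw + max 0 (max a b - 1) * sp := by
  rcases le_total a b with h | h
  · rw [max_eq_right h, max_eq_right
      (add_le_add (mul_le_mul_of_nonneg_right h hcw)
        (mul_le_mul_of_nonneg_right (by omega : max 0 (a-1) ≤ max 0 (b-1)) hsp))]
  · rw [max_eq_left h, max_eq_left
      (add_le_add (mul_le_mul_of_nonneg_right h hcw)
        (mul_le_mul_of_nonneg_right (by omega : max 0 (b-1) ≤ max 0 (a-1)) hsp))]

-- A's running-max loop over per-line widths equals the width formula at the running max length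
theorem pv_loop (cw sp : Int) (hcw : 0 ≤ cw) (hsp : 0 ≤ sp) :
    ∀ (ls : List Int) (a : Int), 0 ≤ a → (∀ l ∈ ls, 0 ≤ l) →
    ls.foldl (fun w l => max w (if l = 0 then 0 else l * cw + max 0 (l - 1) * sp))
        (a * cw + max 0 (a - 1) * sp)
      = (ls.foldl max a) * cw + max 0 (ls.foldl max a - 1) * sp := by
  intro ls
  induction ls with
  | nil => intro a _ _; simp
  | cons l t ih =>
    intro a ha hnn
    have hl : 0 ≤ l := hnn l (by simp)
    have step : (fun w l => max w (if l = 0 then 0 else l * cw + max 0 (l - 1) * sp))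
        (a * cw + max 0 (a - 1) * sp) l = max a l * cw + max 0 (max a l - 1) * sp := by
      beta_reduce
      by_cases h0 : l = 0
      · subst h0
        simpa using pv_f_max cw sp a 0 hcw hsp ha le_rfl
      · rw [if_neg h0]; exact pv_f_max cw sp a l hcw hsp ha hl
    simp only [List.foldl_cons, step]
    exact ih (max a l) (le_trans ha (le_max_left _ _)) (fun x hx => hnn x (by simp [hx]))

-- ===== VERDICT (by name: the statement is the Claim_ definition above) =====
theorem text_dimensions_py_spec : Claim_equal_text_dimensions_py := by
  intro text scale hdom
  unfold Spec_text_dimensions_py text_dimensions_py text_dimensions_py_alt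
  simp only
  set s := if scale ≤ 0 then (1 : Int) else scale with hs
  have hspos : 0 ≤ s := by rw [hs]; split <;> omega
  have hdomS : text.toList.all pvDomChar = true := by
    unfold Dom_text_dimensions_py pvDomStr at hdom
    simp only [Bool.and_eq_true] at hdom
    exact hdom.1
  -- B's scan, described by pv_scan
  have hscan := pv_scan text.toList.length text.toList [] 0 1 le_rfl hdomS le_rfl
  simp only [List.length_nil, Nat.cast_zero] at hscan
  rw [← pv_splitlines_eq] at hscan
  set F := PySem.Chars.splitlines text.toList with hF
  set M : Int := (F.map (fun l => (l.length : Int))).foldl max 0 with hM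
  set lines := if PySem.Str.splitlines text = [] then [""] else PySem.Str.splitlines text with hlines
  have hnil_iff : (PySem.Str.splitlines text = []) ↔ (F = []) := by
    rw [hF, ← PySem.Str.splitlines_map_toList]
    exact List.map_eq_nil_iff.symm
  -- line lists correspond
  have hmapF : lines.map PySem.Str.len = if F = [] then [(0 : Int)] else F.map (fun l => (l.length : Int)) := by
    rw [hlines, hF]
    by_cases he : PySem.Str.splitlines text = []
    · rw [if_pos he, if_pos (hnil_iff.1 he)]
      simp [PySem.Str.len]
    · rw [if_neg he, if_neg (fun hfe => he (hnil_iff.2 hfe))]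
      rw [← PySem.Str.splitlines_map_toList, List.map_map]
      rfl
  have hlenF : PySem.List.len lines = if F = [] then (1 : Int) else (F.length : Int) := by
    rw [hlines, hF]
    by_cases he : PySem.Str.splitlines text = []
    · rw [if_pos he, if_pos (hnil_iff.1 he)]
      simp [PySem.List.len]
    · rw [if_neg he, if_neg (fun hfe => he (hnil_iff.2 hfe))]
      rw [show (PySem.Chars.splitlines text.toList).length = (PySem.Str.splitlines text).length from by
        rw [← PySem.Str.splitlines_map_toList, List.length_map]]
      simp [PySem.List.len]
  -- A's width loop in closed form
  have h0 : (0 : Int) * (3 * s) + max 0 ((0 : Int) - 1) * (1 * s) = 0 := by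
    have hmx : max (0 : Int) (0 - 1) = 0 := by omega
    rw [hmx]; ring
  have hwidth := pv_loop (3 * s) (1 * s) (by omega) (by omega) (lines.map PySem.Str.len) 0 le_rfl
    (by
      intro l hl
      simp only [List.mem_map] at hl
      obtain ⟨y, _, hy⟩ := hl
      rw [← hy]; simp [PySem.Str.len])
  rw [h0, List.foldl_map] at hwidth
  -- the two max-lengths agree
  have hMeq : (lines.map PySem.Str.len).foldl max 0 = M := by
    rw [hmapF, hM]
    by_cases he : F = []
    · rw [if_pos he, he]; simp
    · rw [if_neg he]
  -- the two line counts agree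
  have hNeq : PySem.List.len lines = 1 + max 0 ((F.length : Int) - 1) := by
    rw [hlenF]
    by_cases he : F = []
    · rw [if_pos he, he]; simp
    · rw [if_neg he]
      rcases List.exists_cons_of_ne_nil he with ⟨a, t, hat⟩
      rw [hat]; simp; omega
  rw [hscan]
  refine Prod.ext ?_ ?_
  · simp only
    exact hwidth.trans (by rw [hMeq])
  · simp only
    rw [hNeq]
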